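-- pv_equiv track=rewrite | github.com/kascas/Cryptography_Experiment | SearchSecurity/server/murmurhash2.py | murmurhash2
-- ===== SOURCE A (Python) =====
-- def murmurhash2(key, length, seed):
--     m, r, h, data, i = 0x5bd1e995, 24, seed ^ length, key[:], 0
--     while (length >= 4):
--         k = ((ord(data[i + 3]) << 24) + (ord(data[i + 2]) << 16) + \
--              (ord(data[i + 1]) << 8) + ord(data[i])) & 0xffffffff
--         k = (k * m) & 0xffffffff
--         k ^= k >> r
--         k = (k * m) & 0xffffffff
--
--         h = (h * m) & 0xffffffff
--         h ^= k
--
--         length -= 4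
--         i += 4
--     if length == 3:
--         h ^= ord(data[i + 2]) << 16
--         h ^= ord(data[i + 1]) << 8
--         h ^= ord(data[i])
--         h = (h * m) & 0xffffffff
--     elif length == 2:
--         h ^= ord(data[i + 1]) << 8
--         h ^= ord(data[i])
--         h = (h * m) & 0xffffffff
--     elif length == 1:
--         h ^= ord(data[i])
--         h = (h * m) & 0xffffffff
--
--     h ^= h >> 13
--     h = (h * m) & 0xffffffff
--     h ^= h >> 15
--     return h
-- ===== SOURCE B (Python) =====
-- def murmurhash2(key, length, seed):
--     # single byte-at-a-time streaming pass: a little-endian accumulator is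
--     # flushed through the word mix every 4 bytes; leftover bytes become the tail
--     m, mask = 0x5bd1e995, 0xffffffff
--     h = seed ^ length
--     acc = cnt = 0
--     for j in range(max(length, 0)):
--         acc += ord(key[j]) << (8 * cnt)
--         cnt += 1
--         if cnt == 4:
--             k = (acc * m) & mask
--             k ^= k >> 24
--             k = (k * m) & mask
--             h = ((h * m) & mask) ^ k
--             acc = cnt = 0
--     if cnt:
--         h = ((h ^ acc) * m) & mask
--     h ^= h >> 13
--     h = (h * m) & mask
--     h ^= h >> 15
--     return h
-- ===== Notes on version B (the rewrite author's own statement) =====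
-- stated objective: alternative
-- what changed: B replaces A's word-at-a-time while loop plus explicit 3/2/1-byte if/elif tail by a single byte-at-a-time streaming pass: a little-endian accumulator with a byte counter is flushed through the word mix whenever 4 bytes have been collected, and whatever is left in the accumulator at end-of-stream is xored in as the tail.
import Mathlib
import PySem

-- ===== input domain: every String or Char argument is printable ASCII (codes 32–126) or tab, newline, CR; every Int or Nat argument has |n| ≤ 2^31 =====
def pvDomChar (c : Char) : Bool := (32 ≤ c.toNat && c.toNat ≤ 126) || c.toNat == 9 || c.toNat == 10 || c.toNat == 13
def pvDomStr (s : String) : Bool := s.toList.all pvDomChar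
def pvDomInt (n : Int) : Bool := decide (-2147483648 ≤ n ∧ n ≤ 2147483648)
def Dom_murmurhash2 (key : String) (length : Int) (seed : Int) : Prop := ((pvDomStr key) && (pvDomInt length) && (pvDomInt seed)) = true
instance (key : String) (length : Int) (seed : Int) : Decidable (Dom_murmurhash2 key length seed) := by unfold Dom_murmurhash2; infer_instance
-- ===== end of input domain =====

-- B streams the key one byte at a time through a little-endian accumulator flushed every
-- 4 bytes, the leftover accumulator becoming the tail; A is a word-at-a-time while loop
-- with an explicit if/elif tail chain. Alternative decomposition, same cost.

-- ===== PORT A =====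
def mmOrdA (data : List Char) (i : Int) : Int := ((PySem.List.pyGetD data i ' ').toNat : Int)
def mmLoopA (data : List Char) (h length i : Int) : Int × Int × Int :=
  if 4 ≤ length then
    let k := PySem.Int.band ((mmOrdA data (i + 3) <<< (24:Nat)) + (mmOrdA data (i + 2) <<< (16:Nat)) +
              (mmOrdA data (i + 1) <<< (8:Nat)) + mmOrdA data i) 0xffffffff
    let k := PySem.Int.band (k * 0x5bd1e995) 0xffffffff
    let k := PySem.Int.bxor k (k >>> 24)
    let k := PySem.Int.band (k * 0x5bd1e995) 0xffffffff
    let h := PySem.Int.band (h * 0x5bd1e995) 0xffffffff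
    let h := PySem.Int.bxor h k
    mmLoopA data h (length - 4) (i + 4)
  else (h, length, i)
  termination_by length.toNat
  decreasing_by omega

def murmurhash2 (key : String) (length : Int) (seed : Int) : Int :=
  let m : Int := 0x5bd1e995
  let h : Int := PySem.Int.bxor seed length
  let data := key.toList
  let s := mmLoopA data h length 0
  let h := s.1
  let length := s.2.1
  let i := s.2.2
  let h :=
    if length = 3 then
      let h := PySem.Int.bxor h (mmOrdA data (i + 2) <<< (16:Nat))
      let h := PySem.Int.bxor h (mmOrdA data (i + 1) <<< (8:Nat))
      let h := PySem.Int.bxor h (mmOrdA data i)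
      PySem.Int.band (h * m) 0xffffffff
    else if length = 2 then
      let h := PySem.Int.bxor h (mmOrdA data (i + 1) <<< (8:Nat))
      let h := PySem.Int.bxor h (mmOrdA data i)
      PySem.Int.band (h * m) 0xffffffff
    else if length = 1 then
      let h := PySem.Int.bxor h (mmOrdA data i)
      PySem.Int.band (h * m) 0xffffffff
    else h
  let h := PySem.Int.bxor h (h >>> 13)
  let h := PySem.Int.band (h * m) 0xffffffff
  PySem.Int.bxor h (h >>> 15)

-- ===== PORT B =====
def mmOrdB (key : List Char) (j : Int) : Int := ((PySem.List.pyGetD key j ' ').toNat : Int)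
-- one byte of the stream: extend the accumulator; flush through the word mix on the 4th byte
def mmStepB (key : List Char) (s : Int × Int × Int) (j : Int) : Int × Int × Int :=
  let acc := s.2.1 + (mmOrdB key j <<< (8 * s.2.2).toNat)
  let cnt := s.2.2 + 1
  if cnt = 4 then
    let k := PySem.Int.band (acc * 0x5bd1e995) 0xffffffff
    let k := PySem.Int.bxor k (k >>> 24)
    let k := PySem.Int.band (k * 0x5bd1e995) 0xffffffff
    (PySem.Int.bxor (PySem.Int.band (s.1 * 0x5bd1e995) 0xffffffff) k, 0, 0)
  else (s.1, acc, cnt)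

def murmurhash2_alt (key : String) (length : Int) (seed : Int) : Int :=
  let m : Int := 0x5bd1e995
  let mask : Int := 0xffffffff
  let h := PySem.Int.bxor seed length
  let s := (PySem.List.pyRange 0 (max length 0) 1).foldl (mmStepB key.toList) (h, 0, 0)
  let h := s.1
  let acc := s.2.1
  let cnt := s.2.2
  let h := if cnt ≠ 0 then PySem.Int.band ((PySem.Int.bxor h acc) * m) mask else h
  let h := PySem.Int.bxor h (h >>> 13)
  let h := PySem.Int.band (h * m) mask
  PySem.Int.bxor h (h >>> 15)

-- ===== PRECONDITION & SPEC =====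
-- Pre_ excludes exactly the inputs where the Python A raises IndexError: a length larger than the key.
def Pre_murmurhash2 (key : String) (length : Int) (seed : Int) : Prop :=
  length ≤ PySem.Str.len key
instance (key : String) (length : Int) (seed : Int) : Decidable (Pre_murmurhash2 key length seed) := by unfold Pre_murmurhash2; infer_instance

def pvWitness_murmurhash2 : String × Int × Int := ("abcdefg", 7, 97)

def Spec_murmurhash2 (key : String) (length : Int) (seed : Int) (out : Int) : Prop := out = murmurhash2_alt key length seed
instance (key : String) (length : Int) (seed : Int) (out : Int) : Decidable (Spec_murmurhash2 key length seed out) := by unfold Spec_murmurhash2; infer_instance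

-- ===== CLAIM (what is proved, stated in full; the proofs are below) =====
def Claim_equal_murmurhash2 : Prop := ∀ (key : String) (length : Int) (seed : Int), Dom_murmurhash2 key length seed → Pre_murmurhash2 key length seed → Spec_murmurhash2 key length seed (murmurhash2 key length seed)

-- ===== LEMMAS AND PROOFS =====

-- the per-word mixing function both programs apply, and A's little-endian word
def mmMixB (h k : Int) : Int :=
  let k := PySem.Int.band (k * 0x5bd1e995) 0xffffffff
  let k := PySem.Int.bxor k (k >>> 24)
  let k := PySem.Int.band (k * 0x5bd1e995) 0xffffffff
  PySem.Int.bxor (PySem.Int.band (h * 0x5bd1e995) 0xffffffff) k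

def mmWordA (data : List Char) (w : Int) : Int :=
  PySem.Int.band (mmOrdA data (4 * w) + (mmOrdA data (4 * w + 1) <<< (8:Nat)) +
    (mmOrdA data (4 * w + 2) <<< (16:Nat)) + (mmOrdA data (4 * w + 3) <<< (24:Nat))) 0xffffffff

-- two's-complement view of an Int, used to reorder xors: mmMk s n codes (if s then -n-1 else n)
def mmMk (s : Bool) (n : Nat) : Int := if s then -(n : Int) - 1 else (n : Int)

theorem mmMk_decomp (a : Int) : a = mmMk (decide (a < 0)) (if 0 ≤ a then a.toNat else ((-a).toNat - 1)) := by
  by_cases h : a < 0 <;> simp [mmMk, h, le_of_lt] <;> omega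

theorem mmBxor_mk (s₁ s₂ : Bool) (n₁ n₂ : Nat) :
    PySem.Int.bxor (mmMk s₁ n₁) (mmMk s₂ n₂) = mmMk (s₁ ^^ s₂) (n₁ ^^^ n₂) := by
  have h3 : ∀ n : Nat, ¬ ((1:Int) ≤ -(n:Int)) := by intro n; omega
  cases s₁ <;> cases s₂ <;> simp [mmMk, PySem.Int.bxor, h3]

theorem mmBxor_assoc (a b c : Int) :
    PySem.Int.bxor (PySem.Int.bxor a b) c = PySem.Int.bxor a (PySem.Int.bxor b c) := by
  rw [mmMk_decomp a, mmMk_decomp b, mmMk_decomp c]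
  simp only [mmBxor_mk, Bool.xor_assoc, Nat.xor_assoc]

theorem mmLoopA_step (data : List Char) (h l i : Int) (hc : 4 ≤ l) : mmLoopA data h l i =
    mmLoopA data (mmMixB h (PySem.Int.band ((mmOrdA data (i + 3) <<< (24:Nat)) + (mmOrdA data (i + 2) <<< (16:Nat)) +
      (mmOrdA data (i + 1) <<< (8:Nat)) + mmOrdA data i) 0xffffffff)) (l - 4) (i + 4) := by
  rw [mmLoopA, if_pos hc]
  simp only [mmMixB]

set_option maxHeartbeats 1000000 in
theorem mmLoopA_eq (data : List Char) (n : Int) :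
    ∀ (t : Nat) (w : Nat) (h : Int), (n - 4 * (w : Int)).toNat ≤ t → 4 * (w : Int) ≤ n →
      mmLoopA data h (n - 4 * (w : Int)) (4 * (w : Int)) =
        (((PySem.List.pyRange (w : Int) (PySem.Int.floordiv n 4) 1).map (fun j => mmWordA data j)).foldl mmMixB h,
         PySem.Int.mod n 4, 4 * PySem.Int.floordiv n 4) := by
  intro t
  induction t with
  | zero =>
    intro w h ht hw
    have hq : PySem.Int.floordiv n 4 = (w : Int) :=
      (PySem.Int.floordiv_eq_iff_of_pos (by norm_num)).mpr ⟨by omega, by omega⟩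
    have hm : PySem.Int.mod n 4 = 0 := by
      have := PySem.Int.floordiv_mul_add_mod n 4; omega
    rw [mmLoopA, if_neg (by omega), hq, hm, PySem.List.pyRange_one_eq_nil (le_refl _)]
    simp
    omega
  | succ t ih =>
    intro w h ht hw
    by_cases hc : 4 ≤ n - 4 * (w : Int)
    · have hword : PySem.Int.band ((mmOrdA data (4 * (w : Int) + 3) <<< (24:Nat)) +
            (mmOrdA data (4 * (w : Int) + 2) <<< (16:Nat)) + (mmOrdA data (4 * (w : Int) + 1) <<< (8:Nat)) +
            mmOrdA data (4 * (w : Int))) 0xffffffff = mmWordA data (w : Int) := by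
        simp only [mmWordA]
        exact congrArg (fun x => PySem.Int.band x 0xffffffff) (by ring)
      have hlt : (w : Int) < PySem.Int.floordiv n 4 := by
        have := (PySem.Int.le_floordiv_iff_mul_le (a := n) (b := 4) (q := (w : Int) + 1) (by norm_num)).mpr (by omega)
        omega
      have hstep : ∀ h' : Int, mmLoopA data h' (n - 4 * (w : Int) - 4) (4 * (w : Int) + 4) =
          (((PySem.List.pyRange ((w : Int) + 1) (PySem.Int.floordiv n 4) 1).map (fun j => mmWordA data j)).foldl mmMixB h',
           PySem.Int.mod n 4, 4 * PySem.Int.floordiv n 4) := by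
        intro h'
        have h1 := ih (w + 1) h' (by push_cast; omega) (by push_cast; omega)
        push_cast at h1
        have e1 : n - 4 * ((w : Int) + 1) = n - 4 * (w : Int) - 4 := by ring
        have e2 : 4 * ((w : Int) + 1) = 4 * (w : Int) + 4 := by ring
        rw [e1, e2] at h1
        exact h1
      rw [mmLoopA_step data h _ _ hc, hword, hstep, PySem.List.pyRange_one_cons hlt]
      simp only [List.map_cons, List.foldl_cons]
    · rw [mmLoopA, if_neg hc]
      have hq : PySem.Int.floordiv n 4 = (w : Int) :=
        (PySem.Int.floordiv_eq_iff_of_pos (by norm_num)).mpr ⟨by omega, by omega⟩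
      have hm : PySem.Int.mod n 4 = n - 4 * (w : Int) := by
        have := PySem.Int.floordiv_mul_add_mod n 4; omega
      rw [hq, hm, PySem.List.pyRange_one_eq_nil (le_refl _)]
      simp

-- every byte the ports read is < 128 on the ASCII domain (default ' ' included)
theorem mmByteLt (xs : List Char) (hk : xs.all pvDomChar = true) (j : Int) :
    (PySem.List.pyGetD xs j ' ').toNat < 128 := by
  unfold PySem.List.pyGetD
  cases hg : PySem.List.pyGet? xs j with
  | none => simp [Option.getD]
  | some c =>
    have hc := PySem.List.mem_of_pyGet?_eq_some xs hg
    have h2 := List.all_eq_true.mp hk c hc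
    unfold pvDomChar at h2
    simp only [Option.getD, Bool.or_eq_true, Bool.and_eq_true, decide_eq_true_eq, beq_iff_eq] at h2 ⊢
    omega

-- xor of bit-disjoint naturals is their sum
theorem mmXorAdd : ∀ (s a b : Nat), a < 2 ^ s → a ^^^ (b <<< s) = a + (b <<< s) := by
  intro s
  induction s with
  | zero =>
    intro a b h
    have ha : a = 0 := by omega
    subst ha
    simp
  | succ s ih =>
    intro a b h
    have ha : Nat.bit (a.testBit 0) (a >>> 1) = a := Nat.bit_testBit_zero_shiftRight_one a
    have hb : b <<< (s + 1) = Nat.bit false (b <<< s) := by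
      simp [Nat.bit, Nat.shiftLeft_succ]
    have hd : a >>> 1 < 2 ^ s := by
      have : a >>> 1 = a / 2 := Nat.shiftRight_one a
      rw [this]
      have := pow_succ 2 s
      omega
    calc a ^^^ (b <<< (s + 1))
        = Nat.bit (a.testBit 0) (a >>> 1) ^^^ Nat.bit false (b <<< s) := by rw [ha, hb]
      _ = Nat.bit ((a.testBit 0) ^^ false) ((a >>> 1) ^^^ (b <<< s)) := Nat.xor_bit _ _ _ _
      _ = Nat.bit (a.testBit 0) ((a >>> 1) + (b <<< s)) := by rw [Bool.xor_false, ih _ _ hd]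
      _ = a + (b <<< (s + 1)) := by
          conv_rhs => rw [← ha, hb]
          cases a.testBit 0 <;> simp [Nat.bit] <;> try omega

theorem mmShiftCast (b k : Nat) : ((b : Int) <<< k) = ((b <<< k : Nat) : Int) := by
  simp [Int.shiftLeft_eq, Nat.shiftLeft_eq]

theorem mmXorAddInt (s a b : Nat) (h : a < 2 ^ s) :
    PySem.Int.bxor ((b : Int) <<< s) (a : Int) = (a : Int) + (b : Int) <<< s := by
  rw [mmShiftCast, PySem.Int.bxor_natCast, Nat.xor_comm, mmXorAdd s a b h, Nat.cast_add]

theorem mmBandMask (x : Int) (h0 : 0 ≤ x) (h : x < 4294967296) :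
    PySem.Int.band x 0xffffffff = x := by
  rw [PySem.Int.band_of_nonneg h0 (by norm_num)]
  have he : (0xffffffff : Int).toNat = 2 ^ 32 - 1 := by decide
  rw [he, Nat.and_two_pow_sub_one_eq_mod, Nat.mod_eq_of_lt (by omega)]
  omega

theorem mmTN0 : (0:Int).toNat = 0 := rfl
theorem mmTN8 : (8:Int).toNat = 8 := rfl
theorem mmTN16 : (16:Int).toNat = 16 := rfl
theorem mmTN24 : (24:Int).toNat = 24 := rfl

-- four streamed bytes from a clean state flush through exactly one word mix
theorem mmFoldB4 (d : List Char) (hB : ∀ j : Int, (PySem.List.pyGetD d j ' ').toNat < 128)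
    (w h : Int) :
    (PySem.List.pyRange (4 * w) (4 * w + 4) 1).foldl (mmStepB d) (h, 0, 0)
      = (mmMixB h (mmWordA d w), 0, 0) := by
  have hr : PySem.List.pyRange (4 * w) (4 * w + 4) 1
      = [4 * w, 4 * w + 1, 4 * w + 2, 4 * w + 3] := by
    rw [PySem.List.pyRange_one_cons (by omega), PySem.List.pyRange_one_cons (by omega),
        PySem.List.pyRange_one_cons (by omega), PySem.List.pyRange_one_cons (by omega),
        PySem.List.pyRange_one_eq_nil (by omega)]
    norm_num
    omega
  have hraw : mmWordA d w = mmOrdB d (4 * w) + (mmOrdB d (4 * w + 1) <<< (8:Nat)) +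
      (mmOrdB d (4 * w + 2) <<< (16:Nat)) + (mmOrdB d (4 * w + 3) <<< (24:Nat)) := by
    simp only [mmWordA, mmOrdA, mmOrdB]
    apply mmBandMask
    · have h0 := hB (4 * w); have h1 := hB (4 * w + 1)
      have h2 := hB (4 * w + 2); have h3 := hB (4 * w + 3)
      simp only [Int.shiftLeft_eq]
      positivity
    · have h0 := hB (4 * w); have h1 := hB (4 * w + 1)
      have h2 := hB (4 * w + 2); have h3 := hB (4 * w + 3)
      have c0 : ((PySem.List.pyGetD d (4 * w) ' ').toNat : Int) < 128 := by exact_mod_cast h0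
      have c1 : ((PySem.List.pyGetD d (4 * w + 1) ' ').toNat : Int) < 128 := by exact_mod_cast h1
      have c2 : ((PySem.List.pyGetD d (4 * w + 2) ' ').toNat : Int) < 128 := by exact_mod_cast h2
      have c3 : ((PySem.List.pyGetD d (4 * w + 3) ' ').toNat : Int) < 128 := by exact_mod_cast h3
      have n0 : (0:Int) ≤ ((PySem.List.pyGetD d (4 * w) ' ').toNat : Int) := by positivity
      have n1 : (0:Int) ≤ ((PySem.List.pyGetD d (4 * w + 1) ' ').toNat : Int) := by positivity
      have n2 : (0:Int) ≤ ((PySem.List.pyGetD d (4 * w + 2) ' ').toNat : Int) := by positivity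
      have n3 : (0:Int) ≤ ((PySem.List.pyGetD d (4 * w + 3) ' ').toNat : Int) := by positivity
      simp only [Int.shiftLeft_eq]
      norm_num
      omega
  rw [hr]
  simp only [List.foldl_cons, List.foldl_nil, mmStepB]
  norm_num [mmMixB, hraw, mmTN8, mmTN16, mmTN24, mmTN0, Int.shiftLeft_zero]

-- the body of the stream (a multiple of 4 bytes) is the fold of the word mixes
theorem mmFoldB_body (d : List Char) (hB : ∀ j : Int, (PySem.List.pyGetD d j ' ').toNat < 128) :
    ∀ (w : Nat) (h : Int),
      (PySem.List.pyRange 0 (4 * (w : Int)) 1).foldl (mmStepB d) (h, 0, 0)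
        = (((PySem.List.pyRange 0 (w : Int) 1).map (fun j => mmWordA d j)).foldl mmMixB h, 0, 0) := by
  intro w
  induction w with
  | zero =>
    intro h
    simp [PySem.List.pyRange_one_eq_nil (le_refl (0:Int))]
  | succ w ih =>
    intro h
    have e1 : (4 : Int) * ((w : Nat) + 1 : Nat) = 4 * (w : Int) + 4 := by push_cast; ring
    rw [e1, PySem.List.pyRange_one_append 0 (4 * (w : Int)) (4 * (w : Int) + 4) (by omega) (by omega),
        List.foldl_append, ih, mmFoldB4 d hB]
    have e2 : ((w : Nat) + 1 : Nat) = ((w : Int) + 1) := by push_cast; ring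
    rw [e2, PySem.List.pyRange_one_succ_right (by omega), List.map_append, List.foldl_append]
    simp

-- tail xor chains collapse to a single xor with the byte accumulator
theorem mmTail2 (H x0 : Int) (b1 a0 : Nat) (h0 : a0 < 256) (hx : x0 = (a0 : Int)) :
    PySem.Int.bxor (PySem.Int.bxor H ((b1 : Int) <<< (8:Nat))) x0
      = PySem.Int.bxor H (x0 + (b1 : Int) <<< (8:Nat)) := by
  rw [hx, mmBxor_assoc, mmXorAddInt 8 a0 b1 (by omega)]

theorem mmTail3 (H : Int) (b2 b1 b0 : Nat) (h1 : b1 < 128) (h0 : b0 < 128) :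
    PySem.Int.bxor (PySem.Int.bxor (PySem.Int.bxor H ((b2 : Int) <<< (16:Nat))) ((b1 : Int) <<< (8:Nat))) (b0 : Int)
      = PySem.Int.bxor H ((b0 : Int) + (b1 : Int) <<< (8:Nat) + (b2 : Int) <<< (16:Nat)) := by
  rw [mmBxor_assoc, mmBxor_assoc]
  congr 1
  rw [mmXorAddInt 8 b0 b1 (by omega)]
  have hsum : ((b0 : Int) + (b1 : Int) <<< (8:Nat)) = ((b0 + (b1 <<< (8:Nat)) : Nat) : Int) := by
    rw [mmShiftCast]; push_cast; ring
  rw [hsum, mmXorAddInt 16 (b0 + (b1 <<< (8:Nat))) b2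
    (by rw [Nat.shiftLeft_eq]; norm_num; omega)]

-- ===== VERDICT (by name: the statement is the Claim_ definition above) =====
theorem murmurhash2_spec : Claim_equal_murmurhash2 := by
  intro key length seed hdom hpre
  unfold Spec_murmurhash2
  unfold Dom_murmurhash2 at hdom
  simp only [Bool.and_eq_true] at hdom
  have hkey : key.toList.all pvDomChar = true := hdom.1.1
  have hB : ∀ j : Int, (PySem.List.pyGetD key.toList j ' ').toNat < 128 := mmByteLt key.toList hkey
  simp only [murmurhash2, murmurhash2_alt]
  by_cases hpos : 0 < length
  · -- A side: while loop = fold of word mixes, residue (h, r, 4q)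
    have hloop := mmLoopA_eq key.toList length length.toNat 0 (PySem.Int.bxor seed length)
      (by omega) (by omega)
    simp only [Nat.cast_zero, mul_zero, sub_zero] at hloop
    rw [hloop]
    dsimp only
    have hr0 : 0 ≤ PySem.Int.mod length 4 := PySem.Int.mod_nonneg length (by norm_num)
    have hr4 : PySem.Int.mod length 4 < 4 := PySem.Int.mod_lt length (by norm_num)
    have hq0 : 0 ≤ PySem.Int.floordiv length 4 := by
      have := (PySem.Int.le_floordiv_iff_mul_le (a := length) (b := 4) (q := 0) (by norm_num)).mpr (by omega)
      omega
    have hsplit := PySem.Int.floordiv_mul_add_mod length 4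
    -- B side: split the stream at 4q, body lemma, then the ≤ 3 leftover bytes
    have hmax : max length 0 = length := by omega
    obtain ⟨qn, hqn⟩ : ∃ qn : Nat, (qn : Int) = PySem.Int.floordiv length 4 :=
      ⟨(PySem.Int.floordiv length 4).toNat, by omega⟩
    have hbody := mmFoldB_body key.toList hB qn (PySem.Int.bxor seed length)
    rw [hqn] at hbody
    rw [hmax, PySem.List.pyRange_one_append 0 (4 * PySem.Int.floordiv length 4) length
        (by omega) (by omega), List.foldl_append, hbody]
    set r := PySem.Int.mod length 4 with hrdef
    set q := PySem.Int.floordiv length 4 with hqdef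
    set H := ((PySem.List.pyRange 0 q 1).map (fun j => mmWordA key.toList j)).foldl mmMixB
      (PySem.Int.bxor seed length) with hH
    have hlen : length = 4 * q + r := by omega
    interval_cases r
    · rw [show length = 4 * q + 0 from hlen]
      norm_num [PySem.List.pyRange_one_eq_nil (by omega : 4 * q + 0 ≤ 4 * q)]
    · rw [show length = 4 * q + 1 from hlen,
          PySem.List.pyRange_one_cons (by omega : 4 * q < 4 * q + 1),
          PySem.List.pyRange_one_eq_nil (by omega : 4 * q + 1 ≤ 4 * q + 1)]
      simp only [List.foldl_cons, List.foldl_nil, mmStepB]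
      norm_num [mmOrdA, mmOrdB, mmTN8, mmTN16, mmTN24, mmTN0, Int.shiftLeft_zero]
    · have hrg : PySem.List.pyRange (4 * q) (4 * q + 2) 1 = [4 * q, 4 * q + 1] := by
        rw [PySem.List.pyRange_one_cons (by omega), PySem.List.pyRange_one_cons (by omega),
            PySem.List.pyRange_one_eq_nil (by omega)]
      rw [show length = 4 * q + 2 from hlen, hrg]
      simp only [List.foldl_cons, List.foldl_nil, mmStepB]
      norm_num [mmOrdA, mmOrdB, mmTN8, mmTN16, mmTN24, mmTN0, Int.shiftLeft_zero]
      rw [mmTail2 H _ _ _ (by have := hB (4 * q); omega) rfl]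
    · have hrg : PySem.List.pyRange (4 * q) (4 * q + 3) 1 = [4 * q, 4 * q + 1, 4 * q + 2] := by
        rw [PySem.List.pyRange_one_cons (by omega), PySem.List.pyRange_one_cons (by omega),
            PySem.List.pyRange_one_cons (by omega), PySem.List.pyRange_one_eq_nil (by omega)]
        norm_num
        try omega
      rw [show length = 4 * q + 3 from hlen, hrg]
      simp only [List.foldl_cons, List.foldl_nil, mmStepB]
      norm_num [mmOrdA, mmOrdB, mmTN8, mmTN16, mmTN24, mmTN0, Int.shiftLeft_zero]
      rw [mmTail3 H _ _ _ (hB (4 * q + 1)) (hB (4 * q))]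
  · -- length ≤ 0: the loop and the stream are both empty, no tail
    have hmax : max length 0 = 0 := by omega
    rw [hmax, mmLoopA, if_neg (show ¬ (4:Int) ≤ length by omega),
        PySem.List.pyRange_one_eq_nil (le_refl (0:Int))]
    dsimp only
    rw [if_neg (show length ≠ 3 by omega), if_neg (show length ≠ 2 by omega),
        if_neg (show length ≠ 1 by omega)]
    simp
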